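-- pv_equiv track=rewrite | github.com/gka0903/Coding_Test | 2022.11/2022.11.28/순서쌍의 개수.py | solution
-- ===== SOURCE A (Python) =====
-- from itertools import permutations
--
-- def solution(n):
--     stack = []
--     answer = 0
--     for i in range(1, n + 1):
--         if n % i == 0:
--             stack.append(i)
--             if i * i == n:
--                 answer += 1
--     numbers = list(permutations(stack, 2))
--     for num1, num2 in numbers:
--         if num1 * num2 == n:
--             answer += 1
--
--     return answer
-- ===== SOURCE B (Python) =====
-- def solution(n):
--     count = 0
--     i = 1
--     while i * i <= n:
--         if n % i == 0:
--             count += 1 if i * i == n else 2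
--         i += 1
--     return count
-- ===== Notes on version B (the rewrite author's own statement) =====
-- stated objective: faster
-- what changed: Replaced the O(n) divisor scan plus the O(d^2) pass over all ordered permutations of divisors by a single loop up to sqrt(n) that counts each divisor pair (i, n/i) directly.
import Mathlib
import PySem

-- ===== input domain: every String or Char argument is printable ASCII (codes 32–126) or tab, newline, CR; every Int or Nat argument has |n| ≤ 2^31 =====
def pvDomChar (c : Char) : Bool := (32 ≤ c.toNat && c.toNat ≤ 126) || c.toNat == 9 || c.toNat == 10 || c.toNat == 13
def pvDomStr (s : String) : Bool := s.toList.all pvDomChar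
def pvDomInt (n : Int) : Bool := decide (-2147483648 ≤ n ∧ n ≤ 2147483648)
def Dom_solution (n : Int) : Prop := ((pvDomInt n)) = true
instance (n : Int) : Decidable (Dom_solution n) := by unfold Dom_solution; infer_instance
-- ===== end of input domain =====

-- B replaces A's O(n) divisor scan plus its pass over all ordered divisor permutations
-- by a single loop up to sqrt(n) counting each divisor pair directly (objective: faster).

-- ===== PORT A =====
-- literal port of A: build the divisor stack (with the square bonus), then count the
-- ordered pairs from itertools.permutations(stack, 2) whose product is n.
-- ('for num1, num2 in numbers' is ported as a match on the two-element lists that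
-- PySem.List.permutations stack 2 produces; every element has length 2, so the
-- catch-all branch is never taken and the port is exact.)
def solution (n : Int) : Int :=
  let sa := (PySem.List.pyRange 1 (n + 1) 1).foldl
      (fun (acc : List Int × Int) i =>
        if n % i == 0 then
          (acc.1 ++ [i], if i * i == n then acc.2 + 1 else acc.2)
        else acc) ([], 0)
  let numbers := PySem.List.permutations sa.1 2
  numbers.foldl (fun answer l =>
    match l with
    | [num1, num2] => if num1 * num2 == n then answer + 1 else answer
    | _ => answer) sa.2

-- ===== PORT B =====
-- while i * i <= n: …; i += 1   (the loop terminates: i grows towards n while i*i ≤ n)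
def bLoop (n i count : Int) : Int :=
  if i * i ≤ n then
    bLoop n (i + 1) (count + (if n % i == 0 then (if i * i == n then 1 else 2) else 0))
  else count
termination_by (n + 1 - i).toNat
decreasing_by
  have h0 : 0 ≤ i * i := mul_self_nonneg i
  have h1 : 0 ≤ (i - 1) * (i - 1) := mul_self_nonneg (i - 1)
  have h2 : 2 * i ≤ n + 1 := by nlinarith
  omega

def solution_alt (n : Int) : Int := bLoop n 1 0

-- ===== PRECONDITION & SPEC =====
def Spec_solution (n : Int) (out : Int) : Prop := out = solution_alt n
instance (n : Int) (out : Int) : Decidable (Spec_solution n out) := by unfold Spec_solution; infer_instance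

-- ===== CLAIM (what is proved, stated in full; the proofs are below) =====
def Claim_equal_solution : Prop := ∀ (n : Int), Dom_solution n → Spec_solution n (solution n)

-- ===== LEMMAS AND PROOFS =====
lemma foldA (n : Int) : ∀ (l : List Int) (s : List Int) (a : Int),
    l.foldl (fun (acc : List Int × Int) i =>
      if n % i == 0 then
        (acc.1 ++ [i], if i * i == n then acc.2 + 1 else acc.2)
      else acc) (s, a)
    = (s ++ l.filter (fun i => n % i == 0),
       a + ((l.filter (fun i => n % i == 0)).countP (fun i => i * i == n) : Nat)) := by
  intro l
  induction l with
  | nil => intro s a; simp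
  | cons x t ih =>
    intro s a
    simp only [List.foldl_cons, List.filter_cons]
    by_cases hx : (n % x == 0) = true
    · simp only [hx, if_pos, List.countP_cons]
      rw [ih]
      by_cases hsq : (x * x == n) = true <;> simp [hsq] <;> try omega
    · simp only [hx, Bool.false_eq_true, if_false]
      rw [ih]

lemma foldl_count {α : Type} (q : α → Bool) : ∀ (l : List α) (a : Int),
    l.foldl (fun acc x => if q x then acc + 1 else acc) a = a + (l.countP q : Nat) := by
  intro l
  induction l with
  | nil => intro a; simp
  | cons x t ih =>
    intro a
    by_cases hx : q x = true
    · simp [hx, ih, List.countP_cons]; push_cast; ring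
    · simp [hx, ih, List.countP_cons]
lemma perms_succ {α : Type} (xs : List α) (r : Nat) :
    PySem.List.permutations xs (r+1)
      = (List.range xs.length).flatMap (fun i =>
          match xs[i]? with
          | none => []
          | some a => (PySem.List.permutations (xs.eraseIdx i) r).map (fun p => a :: p)) := by
  rw [PySem.List.permutations]; rfl

lemma flatMap_singletons {α : Type} : ∀ (t : List α),
    (List.range t.length).flatMap (fun j =>
        match t[j]? with
        | none => []
        | some a => [[a]])
      = t.map (fun y => [y]) := by
  intro t
  induction t with
  | nil => simp
  | cons x t ih =>
    rw [List.length_cons, List.range_succ_eq_map, List.flatMap_cons]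
    simp only [List.getElem?_cons_zero, List.flatMap_map, List.getElem?_cons_succ]
    simpa using ih

lemma perms_one {α : Type} (ys : List α) :
    PySem.List.permutations ys 1 = ys.map (fun y => [y]) := by
  rw [perms_succ, ← flatMap_singletons ys]
  apply List.flatMap_congr
  intro j hj
  cases h : ys[j]? with
  | none => rfl
  | some a => simp

def pairList {α : Type} (p : List α) : List α → List (List α)
  | [] => []
  | x :: t => (p ++ t).map (fun b => [x, b]) ++ pairList (p ++ [x]) t

lemma flatMap_pairs {α : Type} : ∀ (t : List α) (p : List α),
    (List.range t.length).flatMap (fun j =>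
        match t[j]? with
        | none => []
        | some a => (p ++ t.eraseIdx j).map (fun b => [a, b]))
      = pairList p t := by
  intro t
  induction t with
  | nil => intro p; simp [pairList]
  | cons x t ih =>
    intro p
    rw [List.length_cons, List.range_succ_eq_map, List.flatMap_cons]
    simp only [List.getElem?_cons_zero, List.eraseIdx_cons_zero, List.flatMap_map]
    rw [pairList]
    congr 1
    rw [← ih (p ++ [x])]
    apply List.flatMap_congr
    intro j hj
    simp [List.eraseIdx_cons_succ]


lemma perms_two {α : Type} (xs : List α) :
    PySem.List.permutations xs 2 = pairList [] xs := by
  rw [perms_succ, ← flatMap_pairs xs []]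
  apply List.flatMap_congr
  intro j hj
  cases h : xs[j]? with
  | none => rfl
  | some a => simp [perms_one, List.map_map, Function.comp]

def divList (n : Int) : List Int :=
  (PySem.List.pyRange 1 (n + 1) 1).filter (fun i => n % i == 0)

lemma mem_divList {n a : Int} : a ∈ divList n ↔ 1 ≤ a ∧ a ≤ n ∧ a ∣ n := by
  simp [divList, List.mem_filter, PySem.List.mem_pyRange_one]
  constructor
  · rintro ⟨⟨h1, h2⟩, h3⟩; exact ⟨h1, by omega, h3⟩
  · rintro ⟨h1, h2, h3⟩; exact ⟨⟨h1, by omega⟩, h3⟩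

lemma nodup_divList (n : Int) : (divList n).Nodup :=
  (PySem.List.nodup_pyRange_one 1 (n + 1)).filter _

def gP (n : Int) : List Int → Bool
  | [a, b] => a * b == n
  | _ => false

lemma inner_count {n a : Int} (ha : a ∈ divList n) :
    ((divList n).erase a).countP (fun b => a * b == n)
      = if a * a == n then 0 else 1 := by
  obtain ⟨h1, h2, hdvd⟩ := mem_divList.mp ha
  have ha0 : a ≠ 0 := by omega
  have hmul : a * (n / a) = n := Int.mul_ediv_cancel' hdvd
  set q := n / a with hq
  have hq1 : 1 ≤ q := by nlinarith [mul_self_nonneg a]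
  have hqn : q ≤ n := by nlinarith
  have hqmem : q ∈ divList n := mem_divList.mpr ⟨hq1, hqn, ⟨a, by rw [← hmul]; ring⟩⟩
  have key : ∀ b : Int, (a * b == n) = (b == q) := by
    intro b
    have hiff : a * b = n ↔ b = q :=
      ⟨fun h => mul_left_cancel₀ ha0 (h.trans hmul.symm), fun h => h ▸ hmul⟩
    rw [Bool.eq_iff_iff]
    simp only [beq_iff_eq]
    exact hiff
  rw [List.countP_congr (fun b _ => by rw [key b])]
  have hcount : ((divList n).erase a).countP (fun b => b == q) = ((divList n).erase a).count q := rfl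
  rw [hcount]
  by_cases hsq : a * a = n
  · have hqa : q = a := mul_left_cancel₀ ha0 (by rw [hmul, hsq])
    rw [hqa]
    have hz : ((divList n).erase a).count a = 0 :=
      List.count_eq_zero.mpr (fun h => ((nodup_divList n).mem_erase_iff.mp h).1 rfl)
    simp [hsq, hz]
  · have hqa : q ≠ a := fun h => hsq (by rw [← hmul, h])
    have : q ∈ (divList n).erase a := (nodup_divList n).mem_erase_iff.mpr ⟨hqa, hqmem⟩
    rw [List.count_eq_one_of_mem ((nodup_divList n).erase a) this]
    simp [hsq]

lemma countP_pairList (n : Int) : ∀ (t p : List Int), p ++ t = divList n →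
    (pairList p t).countP (gP n) = t.countP (fun a => !(a * a == n)) := by
  intro t
  induction t with
  | nil => intro p hp; simp [pairList]
  | cons x t ih =>
    intro p hp
    have hnd : (p ++ x :: t).Nodup := hp ▸ nodup_divList n
    have hx' : x ∉ p ++ t := (List.nodup_cons.mp (List.nodup_middle.mp hnd)).1
    have hxp : x ∉ p := fun h => hx' (List.mem_append_left _ h)
    have herase : p ++ t = (divList n).erase x := by
      rw [← hp, List.erase_append_right _ hxp, List.erase_cons_head]
    have hxmem : x ∈ divList n := by
      rw [← hp]; exact List.mem_append_right p (List.mem_cons_self)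
    rw [pairList, List.countP_append, List.countP_map]
    have hfirst : (p ++ t).countP ((gP n) ∘ (fun b => [x, b]))
        = ((divList n).erase x).countP (fun b => x * b == n) := by
      rw [herase]; rfl
    rw [hfirst, inner_count hxmem, ih (p ++ [x]) (by simpa using hp), List.countP_cons]
    by_cases hsq : (x * x == n) = true <;> simp [hsq] <;> omega


lemma matchFun_eq (n : Int) :
    (fun (answer : Int) (l : List Int) =>
      match l with
      | [num1, num2] => if num1 * num2 == n then answer + 1 else answer
      | _ => answer)
    = (fun (acc : Int) (x : List Int) => if gP n x then acc + 1 else acc) := by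
  funext acc l
  match l with
  | [] => rfl
  | [_] => rfl
  | [_, _] => rfl
  | _ :: _ :: _ :: _ => rfl

lemma solution_eq_length (n : Int) : solution n = ((divList n).length : Int) := by
  unfold solution
  rw [foldA n]
  simp only
  rw [perms_two, matchFun_eq n, foldl_count (gP n)]
  simp only [List.nil_append]
  have hdl : (List.filter (fun i => n % i == 0) (PySem.List.pyRange 1 (n + 1) 1)) = divList n := rfl
  rw [hdl, countP_pairList n (divList n) [] (by simp)]
  have hlen := List.length_eq_countP_add_countP (fun a : Int => a * a == n) (l := divList n)
  have hcc : (divList n).countP (fun a => !(a * a == n))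
      = (divList n).countP (fun a => decide ¬((a * a == n) = true)) :=
    List.countP_congr (fun b _ => by cases h : (b * b == n) <;> simp [h])
  omega


lemma bLoop_eq (n : Int) : ∀ (k : Nat) (i c : Int), (n + 1 - i).toNat ≤ k → 1 ≤ i →
    bLoop n i c = c + ∑ j ∈ (Finset.Icc i n).filter (fun j => j * j ≤ n ∧ n % j = 0),
      (if j * j = n then (1 : Int) else 2) := by
  intro k
  induction k with
  | zero =>
    intro i c hk hi
    have hni : n < i := by omega
    rw [bLoop]
    have hle : ¬ i * i ≤ n := by nlinarith
    rw [if_neg hle, Finset.Icc_eq_empty (by omega)]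
    simp
  | succ k ih =>
    intro i c hk hi
    rw [bLoop]
    by_cases hle : i * i ≤ n
    · have hin : i ≤ n := by nlinarith
      rw [if_pos hle, ih (i + 1) _ (by omega) (by omega)]
      rw [← Finset.insert_Icc_add_one_left_eq_Icc hin, Finset.filter_insert]
      have hnotmem : i ∉ (Finset.Icc (i + 1) n).filter (fun j => j * j ≤ n ∧ n % j = 0) := by
        intro hmem
        rw [Finset.mem_filter, Finset.mem_Icc] at hmem
        omega
      by_cases hd : n % i = 0
      · rw [if_pos (show i * i ≤ n ∧ n % i = 0 from ⟨hle, hd⟩), Finset.sum_insert hnotmem]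
        by_cases hsq : i * i = n <;> simp [hd, hsq] <;> ring
      · rw [if_neg (show ¬ (i * i ≤ n ∧ n % i = 0) from fun hc => hd hc.2)]
        simp [hd]
    · rw [if_neg hle]
      have hempty : (Finset.Icc i n).filter (fun j => j * j ≤ n ∧ n % j = 0) = ∅ := by
        apply Finset.filter_false_of_mem
        intro j hj
        rw [Finset.mem_Icc] at hj
        intro hc
        have : i * i ≤ j * j := by nlinarith
        omega
      rw [hempty]
      simp

def divSet (n : Int) : Finset Int := (divList n).toFinset

lemma mem_divSet {n a : Int} : a ∈ divSet n ↔ 1 ≤ a ∧ a ≤ n ∧ a ∣ n := by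
  simp [divSet, List.mem_toFinset, mem_divList]

lemma core (n : Int) :
    ((divSet n).card : Int)
      = ∑ j ∈ (Finset.Icc 1 n).filter (fun j => j * j ≤ n ∧ n % j = 0),
          (if j * j = n then (1 : Int) else 2) := by
  have hT : (Finset.Icc 1 n).filter (fun j => j * j ≤ n ∧ n % j = 0)
      = (divSet n).filter (fun j => j * j ≤ n) := by
    ext j
    simp only [Finset.mem_filter, Finset.mem_Icc, mem_divSet]
    constructor
    · rintro ⟨⟨h1, h2⟩, h3, h4⟩; exact ⟨⟨h1, h2, Int.dvd_of_emod_eq_zero h4⟩, h3⟩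
    · rintro ⟨⟨h1, h2, h3⟩, h4⟩; exact ⟨⟨h1, h2⟩, h4, Int.emod_eq_zero_of_dvd h3⟩
  rw [hT]
  set D := divSet n with hD
  have hsplit : D.filter (fun j => j * j ≤ n)
      = D.filter (fun j => j * j < n) ∪ D.filter (fun j => j * j = n) := by
    rw [← Finset.filter_or]
    apply Finset.filter_congr
    intro j _
    constructor
    · intro h; rcases lt_or_eq_of_le h with h' | h'
      · exact Or.inl h'
      · exact Or.inr h'
    · rintro (h | h) <;> omega
  have hdisj : Disjoint (D.filter (fun j => j * j < n)) (D.filter (fun j => j * j = n)) := by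
    rw [Finset.disjoint_left]
    intro a ha hb
    rw [Finset.mem_filter] at ha hb
    omega
  rw [hsplit, Finset.sum_union hdisj]
  have hlt : ∑ j ∈ D.filter (fun j => j * j < n), (if j * j = n then (1 : Int) else 2)
      = 2 * (D.filter (fun j => j * j < n)).card := by
    rw [show (∑ j ∈ D.filter (fun j => j * j < n), (if j * j = n then (1 : Int) else 2))
        = ∑ _j ∈ D.filter (fun j => j * j < n), (2 : Int) from
      Finset.sum_congr rfl (fun j hj => by
        rw [Finset.mem_filter] at hj
        rw [if_neg (by omega)])]
    simp [mul_comm]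
  have heq : ∑ j ∈ D.filter (fun j => j * j = n), (if j * j = n then (1 : Int) else 2)
      = (D.filter (fun j => j * j = n)).card := by
    rw [show (∑ j ∈ D.filter (fun j => j * j = n), (if j * j = n then (1 : Int) else 2))
        = ∑ _j ∈ D.filter (fun j => j * j = n), (1 : Int) from
      Finset.sum_congr rfl (fun j hj => by
        rw [Finset.mem_filter] at hj
        rw [if_pos hj.2])]
    simp
  rw [hlt, heq]
  -- card identity
  have h1 := Finset.card_filter_add_card_filter_not (s := D) (fun j => j * j < n)
  have h2 := Finset.card_filter_add_card_filter_not (s := D.filter (fun j => ¬ j * j < n)) (fun j => j * j = n)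
  have he1 : (D.filter (fun j => ¬ j * j < n)).filter (fun j => j * j = n)
      = D.filter (fun j => j * j = n) := by
    rw [Finset.filter_filter]
    apply Finset.filter_congr
    intro j _
    constructor
    · rintro ⟨_, h⟩; exact h
    · intro h; exact ⟨by omega, h⟩
  have he2 : (D.filter (fun j => ¬ j * j < n)).filter (fun j => ¬ j * j = n)
      = D.filter (fun j => n < j * j) := by
    rw [Finset.filter_filter]
    apply Finset.filter_congr
    intro j _
    constructor
    · rintro ⟨h, h'⟩; omega
    · intro h; exact ⟨by omega, by omega⟩
  have hfacts : ∀ a : Int, a ∈ D → 1 ≤ a ∧ a ≤ n ∧ a * (n / a) = n ∧ n / a ∈ D ∧ n / (n / a) = a := by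
    intro a ha
    rw [hD, mem_divSet] at ha
    obtain ⟨h1, h2, hdvd⟩ := ha
    have ha0 : a ≠ 0 := by omega
    have hmul : a * (n / a) = n := Int.mul_ediv_cancel' hdvd
    set q := n / a with hqdef
    have hq1 : 1 ≤ q := by nlinarith [mul_self_nonneg a]
    have hqn : q ≤ n := by nlinarith
    have hq0 : q ≠ 0 := by omega
    have hmul' : q * a = n := by rw [← hmul]; ring
    have hinv : n / q = a := by
      have hc := Int.mul_ediv_cancel_left a hq0
      rw [hmul'] at hc
      exact hc
    exact ⟨h1, h2, hmul, (hD ▸ mem_divSet.mpr ⟨hq1, hqn, ⟨a, hmul'.symm⟩⟩), hinv⟩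
  have hto : ∀ a ∈ D.filter (fun j => n < j * j), n / a ∈ D.filter (fun j => j * j < n) := by
    intro a ha
    rw [Finset.mem_filter] at ha ⊢
    obtain ⟨haD, hgt⟩ := ha
    obtain ⟨h1, h2, hmul, hqD, _⟩ := hfacts a haD
    obtain ⟨hq1, _, _, _, _⟩ := hfacts _ hqD
    refine ⟨hqD, ?_⟩
    have hqa : n / a < a := by nlinarith
    nlinarith
  have hfrom : ∀ a ∈ D.filter (fun j => j * j < n), n / a ∈ D.filter (fun j => n < j * j) := by
    intro a ha
    rw [Finset.mem_filter] at ha ⊢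
    obtain ⟨haD, hlt'⟩ := ha
    obtain ⟨h1, h2, hmul, hqD, _⟩ := hfacts a haD
    obtain ⟨hq1, _, _, _, _⟩ := hfacts _ hqD
    refine ⟨hqD, ?_⟩
    have hqa : a < n / a := by nlinarith
    nlinarith
  have hbij : (D.filter (fun j => n < j * j)).card = (D.filter (fun j => j * j < n)).card := by
    apply Finset.card_bij' (i := fun a _ => n / a) (j := fun a _ => n / a)
    · exact hto
    · exact hfrom
    · intro a ha
      exact (hfacts a (Finset.mem_filter.mp ha).1).2.2.2.2
    · intro a ha
      exact (hfacts a (Finset.mem_filter.mp ha).1).2.2.2.2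
  rw [he1, he2] at h2
  push_cast
  omega

-- ===== VERDICT (by name: the statement is the Claim_ definition above) =====
theorem solution_spec : Claim_equal_solution := by
  intro n _
  unfold Spec_solution
  rw [solution_eq_length n]
  have hb := bLoop_eq n (n + 1 - 1).toNat 1 0 (le_refl _) (le_refl _)
  have halt : solution_alt n
      = ∑ j ∈ (Finset.Icc 1 n).filter (fun j => j * j ≤ n ∧ n % j = 0),
          (if j * j = n then (1 : Int) else 2) := by
    simpa [solution_alt] using hb
  rw [halt, ← core n, divSet, List.toFinset_card_of_nodup (nodup_divList n)]
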